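-- pv_equiv track=rewrite | github.com/ravenxdeath/one4all | CSE221/LAB04/Task06.py | find_max_diamonds
-- ===== SOURCE A (Python) =====
-- def dfs(grid, r, c, visited):
--     if r < 0 or r >= len(grid) or c < 0 or c >= len(grid[0]) or grid[r][c] == '#' or visited[r][c]:
--         return 0
--
--     visited[r][c] = True
--     diamonds = 1 if grid[r][c] == 'D' else 0
--
--     diamonds += dfs(grid, r + 1, c, visited)
--     diamonds += dfs(grid, r - 1, c, visited)
--     diamonds += dfs(grid, r, c + 1, visited)
--     diamonds += dfs(grid, r, c - 1, visited)
--
--     return diamonds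
--
-- def find_max_diamonds(grid):
--     rows = len(grid)
--     cols = len(grid[0])
--     max_diamonds = 0
--
--     visited = [[False for _ in range(cols)] for _ in range(rows)]
--
--     for r in range(rows):
--         for c in range(cols):
--             if grid[r][c] == '.' and not visited[r][c]:
--                 max_diamonds = max(max_diamonds, dfs(grid, r, c, visited))
--
--     return max_diamonds
-- ===== SOURCE B (Python) =====
-- def find_max_diamonds(grid):
--     rows = len(grid)
--     cols = len(grid[0])
--     cells = [grid[r][c] for r in range(rows) for c in range(cols)]
--     visited = [False] * (rows * cols)
--     best = 0
--     for i in range(rows * cols):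
--         r, c = divmod(i, cols)
--         if cells[i] == '.' and not visited[i]:
--             count = 0
--             stack = [(r, c)]
--             while stack:
--                 cr, cc = stack.pop()
--                 if cr < 0 or cr >= rows or cc < 0 or cc >= cols:
--                     continue
--                 j = cr * cols + cc
--                 if cells[j] == '#' or visited[j]:
--                     continue
--                 visited[j] = True
--                 if cells[j] == 'D':
--                     count += 1
--                 stack.extend([(cr, cc - 1), (cr, cc + 1), (cr - 1, cc), (cr + 1, cc)])
--             if count > best:
--                 best = count
--     return best
-- ===== Notes on version B (the rewrite author's own statement) =====
-- stated objective: alternative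
-- what changed: B flattens the grid into one flat cell list and the visited matrix into one flat boolean array indexed by r*cols+c, scans start cells with a single flat-index loop using divmod instead of nested row/column loops, and replaces the recursive dfs helper by an inline explicit-stack flood fill.
import Mathlib
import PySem

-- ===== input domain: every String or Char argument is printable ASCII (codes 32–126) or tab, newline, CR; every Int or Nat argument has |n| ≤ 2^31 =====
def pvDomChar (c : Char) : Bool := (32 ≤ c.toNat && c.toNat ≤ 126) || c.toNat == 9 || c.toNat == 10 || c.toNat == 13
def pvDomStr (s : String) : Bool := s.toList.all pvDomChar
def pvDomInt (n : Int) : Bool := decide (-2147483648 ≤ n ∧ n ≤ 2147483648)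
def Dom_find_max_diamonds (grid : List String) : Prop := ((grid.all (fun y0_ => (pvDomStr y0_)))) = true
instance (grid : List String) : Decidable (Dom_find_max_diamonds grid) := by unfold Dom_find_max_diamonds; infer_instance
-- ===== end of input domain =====

-- B flattens everything: the grid is copied into one flat cell list, visited is one flat boolean
-- array indexed by r*cols+c, the outer scan is a single loop over flat indices (divmod), and the
-- recursive dfs becomes an explicit-stack flood fill (objective: alternative).

-- ===== PORT A =====
-- A-side cell accessors (2-D, getD defaults unreachable under the bounds guards A performs first)
def pvGridAt (g : List (List Char)) (r c : Int) : Char :=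
  (g.getD r.toNat []).getD c.toNat ' '

def pvVisAt (vis : List (List Bool)) (r c : Int) : Bool :=
  (vis.getD r.toNat []).getD c.toNat true

-- visited[r][c] = True
def pvMark (vis : List (List Bool)) (r c : Int) : List (List Bool) :=
  vis.set r.toNat ((vis.getD r.toNat []).set c.toNat true)

-- number of still-unvisited cells: the fuel bound for the recursion
def pvCF (vis : List (List Bool)) : Nat := (vis.map (fun row => row.count false)).sum

-- literal port of A's recursive dfs; fuel (always called with pvCF vis + 1, which never runs out) only
-- makes the recursion structural
def dfs (g : List (List Char)) (rows cols : Int) : Nat → Int → Int → List (List Bool) → Int × List (List Bool)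
  | 0, _, _, vis => (0, vis)
  | fuel+1, r, c, vis =>
    if r < 0 ∨ rows ≤ r ∨ c < 0 ∨ cols ≤ c ∨ pvGridAt g r c = '#' ∨ pvVisAt vis r c then
      (0, vis)
    else
      let v0 := pvMark vis r c
      let d : Int := if pvGridAt g r c = 'D' then 1 else 0
      let p1 := dfs g rows cols fuel (r+1) c v0
      let p2 := dfs g rows cols fuel (r-1) c p1.2
      let p3 := dfs g rows cols fuel r (c+1) p2.2
      let p4 := dfs g rows cols fuel r (c-1) p3.2
      (d + p1.1 + p2.1 + p3.1 + p4.1, p4.2)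

def find_max_diamonds (grid : List String) : Int :=
  let g := grid.map String.toList
  let rows := grid.length
  let cols := (grid.headD "").length   -- Python len(grid[0]): raises on [], excluded by Pre_
  let init : Int × List (List Bool) := (0, List.replicate rows (List.replicate cols false))
  let out := (List.range rows).foldl (fun st r =>
    (List.range cols).foldl (fun st c =>
      if pvGridAt g r c = '.' ∧ pvVisAt st.2 r c = false then
        let p := dfs g (rows : Int) (cols : Int) (pvCF st.2 + 1) r c st.2
        (max st.1 p.1, p.2)
      else st) st) init
  out.1

-- ===== PORT B =====
-- B's flat cell list: [grid[r][c] for r in range(rows) for c in range(cols)]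
def pvCellsB (grid : List String) : List Char :=
  (List.range grid.length).flatMap (fun r =>
    (List.range (grid.headD "").length).map (fun c => ((grid.getD r "").toList).getD c ' '))

-- literal port of B's while-stack loop over the flat arrays: pop, bounds check, then flat index
-- j = r*cols+c for the cell/visited tests, mark, count 'D', push the four neighbours
-- (list head = top of Python's stack); the fuel never runs out at the call site below
def floodF (cells : List Char) (rows cols : Int) : Nat → List (Int × Int) → List Bool → Int → Int × List Bool
  | 0, _, vf, acc => (acc, vf)
  | _+1, [], vf, acc => (acc, vf)
  | fuel+1, (r, c) :: st, vf, acc =>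
    if r < 0 ∨ rows ≤ r ∨ c < 0 ∨ cols ≤ c then
      floodF cells rows cols fuel st vf acc
    else
      let j := (r * cols + c).toNat
      if cells.getD j ' ' = '#' ∨ vf.getD j true then
        floodF cells rows cols fuel st vf acc
      else
        floodF cells rows cols fuel ((r+1, c) :: (r-1, c) :: (r, c+1) :: (r, c-1) :: st)
          (vf.set j true) (acc + (if cells.getD j ' ' = 'D' then 1 else 0))

def find_max_diamonds_alt (grid : List String) : Int :=
  let rows := grid.length
  let cols := (grid.headD "").length   -- Python len(grid[0]): raises on [], excluded by Pre_
  let cells := pvCellsB grid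
  let init : Int × List Bool := (0, List.replicate (rows * cols) false)
  let out := (List.range (rows * cols)).foldl (fun st i =>
    let r := i / cols
    let c := i % cols
    if cells.getD i ' ' = '.' ∧ st.2.getD i true = false then
      let q := floodF cells (rows : Int) (cols : Int) (4 * st.2.count false + 2) [((r : Int), (c : Int))] st.2 0
      (if st.1 < q.1 then q.1 else st.1, q.2)
    else st) init
  out.1

-- ===== PRECONDITION & SPEC =====
-- Pre_ excludes exactly the grids on which Python A raises IndexError: the empty grid (len(grid[0]))
-- and grids with a row shorter than the first row (grid[r][c] is read for every c < len(grid[0])).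
def Pre_find_max_diamonds (grid : List String) : Prop :=
  grid ≠ [] ∧ ∀ s ∈ grid, (grid.headD "").length ≤ s.length
instance (grid : List String) : Decidable (Pre_find_max_diamonds grid) := by
  unfold Pre_find_max_diamonds; infer_instance

def pvWitness_find_max_diamonds : List String := ["D.D", "#.#"]

def Spec_find_max_diamonds (grid : List String) (out : Int) : Prop := out = find_max_diamonds_alt grid
instance (grid : List String) (out : Int) : Decidable (Spec_find_max_diamonds grid out) := by
  unfold Spec_find_max_diamonds; infer_instance

-- ===== CLAIM (what is proved, stated in full; the proofs are below) =====
def Claim_equal_find_max_diamonds : Prop := ∀ (grid : List String), Dom_find_max_diamonds grid → Pre_find_max_diamonds grid → Spec_find_max_diamonds grid (find_max_diamonds grid)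

-- ===== LEMMAS AND PROOFS =====

-- rectangular shape of A's visited structure
def pvShape (rowsN colsN : Nat) (vis : List (List Bool)) : Prop :=
  vis.length = rowsN ∧ ∀ row ∈ vis, row.length = colsN

-- canonical-fuel wrappers (proof-only)
def DfsC (g : List (List Char)) (rows cols r c : Int) (vis : List (List Bool)) : Int × List (List Bool) :=
  dfs g rows cols (pvCF vis + 1) r c vis

def LoopFC (cells : List Char) (rowsN colsN : Nat) (st : List (Int × Int)) (vf : List Bool) (acc : Int) : Int × List Bool :=
  floodF cells (rowsN : Int) (colsN : Int) (st.length + 4 * vf.count false + 1) st vf acc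

theorem sum_set_nat (l : List Nat) (i : Nat) (a : Nat) (h : i < l.length) :
    (l.set i a).sum + l[i] = l.sum + a := by
  induction l generalizing i with
  | nil => simp at h
  | cons x t ih =>
    cases i with
    | zero => simp [List.set]; omega
    | succ j =>
      simp only [List.set, List.sum_cons, List.getElem_cons_succ]
      have := ih j (by simpa using h)
      omega

theorem count_set_false (row : List Bool) (j : Nat) (h : row.getD j true = false) :
    (row.set j true).count false + 1 = row.count false := by
  induction row generalizing j with
  | nil => simp [List.getD] at h
  | cons b t ih =>
    cases j with
    | zero =>
      simp [List.getD] at h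
      subst h
      simp
    | succ j' =>
      simp only [List.getD_cons_succ] at h
      have := ih j' h
      simp only [List.set]
      simp only [List.count_cons]
      omega

theorem cf_mark (vis : List (List Bool)) (r c : Int) (h : pvVisAt vis r c = false) :
    pvCF (pvMark vis r c) + 1 = pvCF vis := by
  unfold pvVisAt at h
  unfold pvMark pvCF
  have hi : r.toNat < vis.length := by
    by_contra hi
    rw [List.getD_eq_default _ _ (Nat.le_of_not_lt hi)] at h
    simp at h
  have hrow : vis.getD r.toNat [] = vis[r.toNat] := List.getD_eq_getElem _ _ hi
  rw [hrow] at h ⊢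
  have hj : c.toNat < (vis[r.toNat]).length := by
    by_contra hj
    rw [List.getD_eq_default _ _ (Nat.le_of_not_lt hj)] at h
    exact absurd h (by simp)
  rw [List.map_set]
  have hmi : r.toNat < (vis.map (fun row => row.count false)).length := by simpa using hi
  have hs := sum_set_nat (vis.map (fun row => row.count false)) r.toNat
      (((vis[r.toNat]).set c.toNat true).count false) hmi
  rw [List.getElem_map] at hs
  have hc := count_set_false (vis[r.toNat]) c.toNat h
  omega

theorem cf_pos_of_unvisited (vis : List (List Bool)) (r c : Int) (h : pvVisAt vis r c = false) :
    0 < pvCF vis := by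
  have := cf_mark vis r c h; omega

theorem guard_unvisited {g : List (List Char)} {rows cols r c : Int} {vis : List (List Bool)}
    (hg : ¬ (r < 0 ∨ rows ≤ r ∨ c < 0 ∨ cols ≤ c ∨ pvGridAt g r c = '#' ∨ pvVisAt vis r c)) :
    pvVisAt vis r c = false := by
  cases hx : pvVisAt vis r c
  · rfl
  · exact absurd (Or.inr (Or.inr (Or.inr (Or.inr (Or.inr (by simp [hx]))))) ) hg

theorem dfs_mono (g : List (List Char)) (rows cols : Int) :
    ∀ fuel r c vis, pvCF (dfs g rows cols fuel r c vis).2 ≤ pvCF vis := by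
  intro fuel
  induction fuel with
  | zero => intro r c vis; simp [dfs]
  | succ f ih =>
    intro r c vis
    rw [dfs]
    split
    · simp
    · rename_i hg
      simp only []
      have hv : pvVisAt vis r c = false := guard_unvisited hg
      have h0 : pvCF (pvMark vis r c) + 1 = pvCF vis := cf_mark vis r c hv
      have h1 := ih (r+1) c (pvMark vis r c)
      have h2 := ih (r-1) c (dfs g rows cols f (r+1) c (pvMark vis r c)).2
      have h3 := ih r (c+1) (dfs g rows cols f (r-1) c (dfs g rows cols f (r+1) c (pvMark vis r c)).2).2
      have h4 := ih r (c-1) (dfs g rows cols f r (c+1) (dfs g rows cols f (r-1) c (dfs g rows cols f (r+1) c (pvMark vis r c)).2).2).2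
      omega

theorem dfs_irrel (g : List (List Char)) (rows cols : Int) :
    ∀ fuel fuel' r c vis, pvCF vis < fuel → pvCF vis < fuel' →
      dfs g rows cols fuel r c vis = dfs g rows cols fuel' r c vis := by
  intro fuel
  induction fuel with
  | zero => intro fuel' r c vis h; omega
  | succ f ih =>
    intro fuel' r c vis h h'
    cases fuel' with
    | zero => omega
    | succ f' =>
      rw [dfs, dfs]
      split
      · rfl
      · rename_i hg
        simp only []
        have hv : pvVisAt vis r c = false := guard_unvisited hg
        have h0 : pvCF (pvMark vis r c) + 1 = pvCF vis := cf_mark vis r c hv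
        have e1 : dfs g rows cols f (r+1) c (pvMark vis r c)
            = dfs g rows cols f' (r+1) c (pvMark vis r c) := ih f' _ _ _ (by omega) (by omega)
        rw [← e1]
        have m1 := dfs_mono g rows cols f (r+1) c (pvMark vis r c)
        have e2 : dfs g rows cols f (r-1) c (dfs g rows cols f (r+1) c (pvMark vis r c)).2
            = dfs g rows cols f' (r-1) c (dfs g rows cols f (r+1) c (pvMark vis r c)).2 :=
          ih f' _ _ _ (by omega) (by omega)
        rw [← e2]
        have m2 := dfs_mono g rows cols f (r-1) c (dfs g rows cols f (r+1) c (pvMark vis r c)).2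
        have e3 : dfs g rows cols f r (c+1) (dfs g rows cols f (r-1) c (dfs g rows cols f (r+1) c (pvMark vis r c)).2).2
            = dfs g rows cols f' r (c+1) (dfs g rows cols f (r-1) c (dfs g rows cols f (r+1) c (pvMark vis r c)).2).2 :=
          ih f' _ _ _ (by omega) (by omega)
        rw [← e3]
        have m3 := dfs_mono g rows cols f r (c+1) (dfs g rows cols f (r-1) c (dfs g rows cols f (r+1) c (pvMark vis r c)).2).2
        have e4 : dfs g rows cols f r (c-1) (dfs g rows cols f r (c+1) (dfs g rows cols f (r-1) c (dfs g rows cols f (r+1) c (pvMark vis r c)).2).2).2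
            = dfs g rows cols f' r (c-1) (dfs g rows cols f r (c+1) (dfs g rows cols f (r-1) c (dfs g rows cols f (r+1) c (pvMark vis r c)).2).2).2 :=
          ih f' _ _ _ (by omega) (by omega)
        rw [← e4]

-- one unfolding of dfs in the unblocked case, written flat
theorem dfs_step (g : List (List Char)) (rows cols : Int) (f : Nat) (r c : Int)
    (vis : List (List Bool))
    (hg : ¬ (r < 0 ∨ rows ≤ r ∨ c < 0 ∨ cols ≤ c ∨ pvGridAt g r c = '#' ∨ pvVisAt vis r c)) :
    dfs g rows cols (f+1) r c vis =
      ((if pvGridAt g r c = 'D' then 1 else 0)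
        + (dfs g rows cols f (r+1) c (pvMark vis r c)).1
        + (dfs g rows cols f (r-1) c (dfs g rows cols f (r+1) c (pvMark vis r c)).2).1
        + (dfs g rows cols f r (c+1) (dfs g rows cols f (r-1) c (dfs g rows cols f (r+1) c (pvMark vis r c)).2).2).1
        + (dfs g rows cols f r (c-1) (dfs g rows cols f r (c+1) (dfs g rows cols f (r-1) c (dfs g rows cols f (r+1) c (pvMark vis r c)).2).2).2).1,
       (dfs g rows cols f r (c-1) (dfs g rows cols f r (c+1) (dfs g rows cols f (r-1) c (dfs g rows cols f (r+1) c (pvMark vis r c)).2).2).2).2) := by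
  rw [dfs]
  simp [hg]

-- ---- flattening lemmas: the 2-D visited/grid of A versus the flat arrays of B ----

theorem flat_getD {α : Type} (d : α) (colsN : Nat) :
    ∀ (L : List (List α)) (r c : Nat), (∀ row ∈ L, row.length = colsN) → c < colsN →
      L.flatten.getD (r * colsN + c) d = (L.getD r []).getD c d := by
  intro L
  induction L with
  | nil => intro r c _ _; simp [List.getD]
  | cons row rest ih =>
    intro r c hrows hc
    have hrow : row.length = colsN := hrows row (by simp)
    cases r with
    | zero =>
      simp only [Nat.zero_mul, Nat.zero_add, List.flatten_cons, List.getD_cons_zero]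
      have hlt : c < row.length := by omega
      rw [List.getD_append _ _ _ _ hlt]
    | succ r' =>
      simp only [List.flatten_cons, List.getD_cons_succ]
      have hge : row.length ≤ (r' + 1) * colsN + c := by
        simp only [hrow, Nat.succ_mul]; omega
      rw [List.getD_append_right _ _ _ _ hge]
      have : (r' + 1) * colsN + c - row.length = r' * colsN + c := by
        simp only [hrow, Nat.succ_mul]; omega
      rw [this]
      exact ih r' c (fun row h => hrows row (by simp [h])) hc

theorem flatten_length (colsN : Nat) :
    ∀ (L : List (List Bool)), (∀ row ∈ L, row.length = colsN) → L.flatten.length = L.length * colsN := by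
  intro L
  induction L with
  | nil => simp
  | cons a t ih =>
    intro h
    simp only [List.flatten_cons, List.length_append, List.length_cons]
    rw [ih (fun row hr => h row (by simp [hr])), h a (by simp)]
    ring

theorem flatten_set (colsN : Nat) :
    ∀ (L : List (List Bool)) (r c : Nat), (∀ row ∈ L, row.length = colsN) → c < colsN → r < L.length →
      (L.set r ((L.getD r []).set c true)).flatten = L.flatten.set (r * colsN + c) true := by
  intro L
  induction L with
  | nil => intro r c _ _ h; simp at h
  | cons row rest ih =>
    intro r c hrows hc _
    have hrow : row.length = colsN := hrows row (by simp)
    cases r with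
    | zero =>
      simp only [Nat.zero_mul, Nat.zero_add, List.getD_cons_zero, List.set_cons_zero,
        List.flatten_cons]
      rw [List.set_append_left _ _ (by omega)]
    | succ r' =>
      simp only [List.getD_cons_succ, List.set_cons_succ, List.flatten_cons]
      rw [List.set_append_right _ _ (by simp only [hrow, Nat.succ_mul]; omega)]
      have hidx : (r' + 1) * colsN + c - row.length = r' * colsN + c := by
        simp only [hrow, Nat.succ_mul]; omega
      rw [hidx]
      by_cases hr' : r' < rest.length
      · rw [ih r' c (fun row h => hrows row (by simp [h])) hc hr']
      · -- out of range: both sides are no-ops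
        have h1 : rest.set r' ((rest.getD r' []).set c true) = rest := by
          rw [List.getD_eq_default _ _ (by omega)]
          simp
          exact List.set_eq_of_length_le (by omega)
        rw [h1]
        have h2 : rest.flatten.length ≤ r' * colsN + c := by
          rw [flatten_length colsN rest (fun row h => hrows row (by simp [h]))]
          have : rest.length * colsN ≤ r' * colsN := Nat.mul_le_mul_right _ (by omega)
          omega
        rw [List.set_eq_of_length_le h2]

theorem mark_shape (rowsN colsN : Nat) (vis : List (List Bool)) (r c : Int)
    (h : pvShape rowsN colsN vis) : pvShape rowsN colsN (pvMark vis r c) := by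
  obtain ⟨hlen, hrows⟩ := h
  by_cases hi : r.toNat < vis.length
  · constructor
    · simp [pvMark, hlen]
    · intro row hrow
      rcases List.mem_or_eq_of_mem_set hrow with h1 | h1
      · exact hrows row h1
      · subst h1
        rw [List.length_set, List.getD_eq_getElem _ _ hi]
        exact hrows _ (List.getElem_mem hi)
  · unfold pvMark
    rw [List.set_eq_of_length_le (by omega)]
    exact ⟨hlen, hrows⟩

theorem dfs_shape (g : List (List Char)) (rows cols : Int) (rowsN colsN : Nat) :
    ∀ fuel r c vis, pvShape rowsN colsN vis → pvShape rowsN colsN (dfs g rows cols fuel r c vis).2 := by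
  intro fuel
  induction fuel with
  | zero => intro r c vis h; simpa [dfs] using h
  | succ f ih =>
    intro r c vis h
    rw [dfs]
    split
    · simpa using h
    · simp only []
      exact ih _ _ _ (ih _ _ _ (ih _ _ _ (ih _ _ _ (mark_shape _ _ _ _ _ h))))

-- LoopFC's clean recursion equations
theorem loopFC_nil (cells : List Char) (rowsN colsN : Nat) (vf : List Bool) (acc : Int) :
    LoopFC cells rowsN colsN [] vf acc = (acc, vf) := by
  unfold LoopFC
  rw [floodF]

theorem loopFC_blocked_bounds (cells : List Char) (rowsN colsN : Nat) (r c : Int)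
    (st : List (Int × Int)) (vf : List Bool) (acc : Int)
    (h : r < 0 ∨ (rowsN : Int) ≤ r ∨ c < 0 ∨ (colsN : Int) ≤ c) :
    LoopFC cells rowsN colsN ((r, c) :: st) vf acc = LoopFC cells rowsN colsN st vf acc := by
  unfold LoopFC
  simp only [List.length_cons]
  rw [show st.length + 1 + 4 * vf.count false + 1 = (st.length + 4 * vf.count false + 1) + 1 by omega]
  rw [floodF]
  simp [h]

theorem loopFC_blocked_cell (cells : List Char) (rowsN colsN : Nat) (r c : Int)
    (st : List (Int × Int)) (vf : List Bool) (acc : Int)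
    (hb : ¬ (r < 0 ∨ (rowsN : Int) ≤ r ∨ c < 0 ∨ (colsN : Int) ≤ c))
    (h : cells.getD (r * colsN + c).toNat ' ' = '#' ∨ vf.getD (r * colsN + c).toNat true) :
    LoopFC cells rowsN colsN ((r, c) :: st) vf acc = LoopFC cells rowsN colsN st vf acc := by
  unfold LoopFC
  simp only [List.length_cons]
  rw [show st.length + 1 + 4 * vf.count false + 1 = (st.length + 4 * vf.count false + 1) + 1 by omega]
  rw [floodF]
  rw [List.getD_eq_getElem?_getD, List.getD_eq_getElem?_getD] at h
  simp [hb, h]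

theorem loopFC_step (cells : List Char) (rowsN colsN : Nat) (r c : Int)
    (st : List (Int × Int)) (vf : List Bool) (acc : Int)
    (hb : ¬ (r < 0 ∨ (rowsN : Int) ≤ r ∨ c < 0 ∨ (colsN : Int) ≤ c))
    (h : ¬ (cells.getD (r * colsN + c).toNat ' ' = '#' ∨ vf.getD (r * colsN + c).toNat true)) :
    LoopFC cells rowsN colsN ((r, c) :: st) vf acc =
      LoopFC cells rowsN colsN ((r+1, c) :: (r-1, c) :: (r, c+1) :: (r, c-1) :: st)
        (vf.set (r * colsN + c).toNat true)
        (acc + (if cells.getD (r * colsN + c).toNat ' ' = 'D' then 1 else 0)) := by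
  have hv : vf.getD (r * colsN + c).toNat true = false := by
    cases hx : vf.getD (r * colsN + c).toNat true
    · rfl
    · exact absurd (Or.inr hx) h
  have h0 := count_set_false vf (r * colsN + c).toNat hv
  unfold LoopFC
  simp only [List.length_cons]
  rw [show st.length + 1 + 4 * vf.count false + 1
      = (st.length + 1 + 1 + 1 + 1 + 4 * (vf.set (r * colsN + c).toNat true).count false + 1) + 1 by omega]
  rw [floodF]
  rw [List.getD_eq_getElem?_getD, List.getD_eq_getElem?_getD] at h
  push Not at h
  simp [hb, h.1, h.2, List.getD_eq_getElem?_getD]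

-- in-bounds agreement of the flat accessors with A's 2-D accessors
theorem flat_agree (g : List (List Char)) (cells : List Char) (rowsN colsN : Nat)
    (hcells : ∀ a b : Nat, a < rowsN → b < colsN →
      cells.getD (a * colsN + b) ' ' = pvGridAt g (a : Int) (b : Int))
    (vis : List (List Bool)) (hs : pvShape rowsN colsN vis) (r c : Int)
    (hb : ¬ (r < 0 ∨ (rowsN : Int) ≤ r ∨ c < 0 ∨ (colsN : Int) ≤ c)) :
    (r * (colsN : Int) + c).toNat = r.toNat * colsN + c.toNat ∧
      cells.getD (r * (colsN : Int) + c).toNat ' ' = pvGridAt g r c ∧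
      vis.flatten.getD (r * (colsN : Int) + c).toNat true = pvVisAt vis r c := by
  have hr0 : 0 ≤ r := by omega
  have hc0 : 0 ≤ c := by omega
  have hrlt : r.toNat < rowsN := by omega
  have hclt : c.toNat < colsN := by omega
  have har : ((r.toNat : Int)) = r := Int.toNat_of_nonneg hr0
  have hac : ((c.toNat : Int)) = c := Int.toNat_of_nonneg hc0
  have hj : (r * (colsN : Int) + c).toNat = r.toNat * colsN + c.toNat := by
    have h1 : r * (colsN : Int) + c = ((r.toNat * colsN + c.toNat : Nat) : Int) := by
      push_cast
      rw [har, hac]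
    rw [h1, Int.toNat_natCast]
  refine ⟨hj, ?_, ?_⟩
  · rw [hj]
    have := hcells r.toNat c.toNat hrlt hclt
    rwa [har, hac] at this
  · rw [hj, flat_getD true colsN vis r.toNat c.toNat hs.2 hclt]
    rfl

-- a blocked pop corresponds to a dfs call that returns immediately
theorem sim_blocked (g : List (List Char)) (cells : List Char) (rowsN colsN : Nat)
    (hcells : ∀ a b : Nat, a < rowsN → b < colsN →
      cells.getD (a * colsN + b) ' ' = pvGridAt g (a : Int) (b : Int))
    (vis : List (List Bool)) (hs : pvShape rowsN colsN vis) (r c : Int)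
    (st : List (Int × Int)) (acc : Int)
    (hg : r < 0 ∨ (rowsN : Int) ≤ r ∨ c < 0 ∨ (colsN : Int) ≤ c ∨ pvGridAt g r c = '#' ∨ pvVisAt vis r c) :
    LoopFC cells rowsN colsN ((r, c) :: st) vis.flatten acc =
      LoopFC cells rowsN colsN st (DfsC g rowsN colsN r c vis).2.flatten
        (acc + (DfsC g rowsN colsN r c vis).1) := by
  have hD : DfsC g (rowsN : Int) (colsN : Int) r c vis = (0, vis) := by
    unfold DfsC; rw [dfs]; simp [hg]
  rw [hD]
  simp only [add_zero]
  by_cases hb : r < 0 ∨ (rowsN : Int) ≤ r ∨ c < 0 ∨ (colsN : Int) ≤ c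
  · exact loopFC_blocked_bounds cells rowsN colsN r c st vis.flatten acc hb
  · obtain ⟨hj, hcell, hvis⟩ := flat_agree g cells rowsN colsN hcells vis hs r c hb
    have hcg : pvGridAt g r c = '#' ∨ pvVisAt vis r c := by tauto
    exact loopFC_blocked_cell cells rowsN colsN r c st vis.flatten acc hb
      (by rw [hcell, hvis]; exact hcg)

-- the simulation: popping one cell off the flat stack behaves like one recursive dfs call
theorem sim (g : List (List Char)) (cells : List Char) (rowsN colsN : Nat)
    (hcells : ∀ a b : Nat, a < rowsN → b < colsN →
      cells.getD (a * colsN + b) ' ' = pvGridAt g (a : Int) (b : Int)) :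
    ∀ n vis, pvShape rowsN colsN vis → pvCF vis ≤ n → ∀ (r c : Int) st acc,
      LoopFC cells rowsN colsN ((r, c) :: st) vis.flatten acc =
        LoopFC cells rowsN colsN st (DfsC g rowsN colsN r c vis).2.flatten
          (acc + (DfsC g rowsN colsN r c vis).1) := by
  intro n
  induction n with
  | zero =>
    intro vis hs hn r c st acc
    by_cases hg : r < 0 ∨ (rowsN : Int) ≤ r ∨ c < 0 ∨ (colsN : Int) ≤ c ∨ pvGridAt g r c = '#' ∨ pvVisAt vis r c
    · exact sim_blocked g cells rowsN colsN hcells vis hs r c st acc hg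
    · have hv : pvVisAt vis r c = false := guard_unvisited hg
      have := cf_pos_of_unvisited vis r c hv
      omega
  | succ n ih =>
    intro vis hs hn r c st acc
    by_cases hg : r < 0 ∨ (rowsN : Int) ≤ r ∨ c < 0 ∨ (colsN : Int) ≤ c ∨ pvGridAt g r c = '#' ∨ pvVisAt vis r c
    · exact sim_blocked g cells rowsN colsN hcells vis hs r c st acc hg
    · have hb : ¬ (r < 0 ∨ (rowsN : Int) ≤ r ∨ c < 0 ∨ (colsN : Int) ≤ c) := by tauto
      obtain ⟨hj, hcell, hvis⟩ := flat_agree g cells rowsN colsN hcells vis hs r c hb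
      have hv : pvVisAt vis r c = false := guard_unvisited hg
      have h0 : pvCF (pvMark vis r c) + 1 = pvCF vis := cf_mark vis r c hv
      have hcg : ¬ (cells.getD (r * (colsN : Int) + c).toNat ' ' = '#'
          ∨ vis.flatten.getD (r * (colsN : Int) + c).toNat true) := by
        rw [hcell, hvis]; tauto
      rw [loopFC_step cells rowsN colsN r c st vis.flatten acc hb hcg]
      have hmf : vis.flatten.set (r * (colsN : Int) + c).toNat true = (pvMark vis r c).flatten := by
        unfold pvMark
        rw [hj, flatten_set colsN vis r.toNat c.toNat hs.2 (by omega) (by rw [hs.1]; omega)]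
      rw [hmf, hcell]
      have sh0 : pvShape rowsN colsN (pvMark vis r c) := mark_shape rowsN colsN vis r c hs
      rw [ih (pvMark vis r c) sh0 (by omega) (r+1) c ((r-1, c) :: (r, c+1) :: (r, c-1) :: st)
        (acc + (if pvGridAt g r c = 'D' then 1 else 0))]
      set P1 := DfsC g (rowsN : Int) (colsN : Int) (r+1) c (pvMark vis r c) with hP1
      have m1 : pvCF P1.2 ≤ pvCF (pvMark vis r c) := by rw [hP1]; unfold DfsC; exact dfs_mono _ _ _ _ _ _ _
      have sh1 : pvShape rowsN colsN P1.2 := by rw [hP1]; unfold DfsC; exact dfs_shape _ _ _ _ _ _ _ _ _ sh0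
      rw [ih P1.2 sh1 (by omega) (r-1) c ((r, c+1) :: (r, c-1) :: st)
        (acc + (if pvGridAt g r c = 'D' then 1 else 0) + P1.1)]
      set P2 := DfsC g (rowsN : Int) (colsN : Int) (r-1) c P1.2 with hP2
      have m2 : pvCF P2.2 ≤ pvCF P1.2 := by rw [hP2]; unfold DfsC; exact dfs_mono _ _ _ _ _ _ _
      have sh2 : pvShape rowsN colsN P2.2 := by rw [hP2]; unfold DfsC; exact dfs_shape _ _ _ _ _ _ _ _ _ sh1
      rw [ih P2.2 sh2 (by omega) r (c+1) ((r, c-1) :: st)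
        (acc + (if pvGridAt g r c = 'D' then 1 else 0) + P1.1 + P2.1)]
      set P3 := DfsC g (rowsN : Int) (colsN : Int) r (c+1) P2.2 with hP3
      have m3 : pvCF P3.2 ≤ pvCF P2.2 := by rw [hP3]; unfold DfsC; exact dfs_mono _ _ _ _ _ _ _
      have sh3 : pvShape rowsN colsN P3.2 := by rw [hP3]; unfold DfsC; exact dfs_shape _ _ _ _ _ _ _ _ _ sh2
      rw [ih P3.2 sh3 (by omega) r (c-1) st
        (acc + (if pvGridAt g r c = 'D' then 1 else 0) + P1.1 + P2.1 + P3.1)]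
      set P4 := DfsC g (rowsN : Int) (colsN : Int) r (c-1) P3.2 with hP4
      have e1 : dfs g (rowsN : Int) (colsN : Int) (pvCF vis) (r+1) c (pvMark vis r c) = P1 := by
        rw [hP1]; unfold DfsC; rw [h0]
      have e2 : dfs g (rowsN : Int) (colsN : Int) (pvCF vis) (r-1) c P1.2 = P2 := by
        rw [hP2]; unfold DfsC; exact dfs_irrel _ _ _ _ _ _ _ _ (by omega) (by omega)
      have e3 : dfs g (rowsN : Int) (colsN : Int) (pvCF vis) r (c+1) P2.2 = P3 := by
        rw [hP3]; unfold DfsC; exact dfs_irrel _ _ _ _ _ _ _ _ (by omega) (by omega)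
      have e4 : dfs g (rowsN : Int) (colsN : Int) (pvCF vis) r (c-1) P3.2 = P4 := by
        rw [hP4]; unfold DfsC; exact dfs_irrel _ _ _ _ _ _ _ _ (by omega) (by omega)
      have hD : DfsC g (rowsN : Int) (colsN : Int) r c vis =
          ((if pvGridAt g r c = 'D' then 1 else 0) + P1.1 + P2.1 + P3.1 + P4.1, P4.2) := by
        unfold DfsC
        rw [dfs_step g (rowsN : Int) (colsN : Int) (pvCF vis) r c vis hg, e1, e2, e3, e4]
      rw [hD]
      have : acc + (if pvGridAt g r c = 'D' then 1 else 0) + P1.1 + P2.1 + P3.1 + P4.1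
          = acc + ((if pvGridAt g r c = 'D' then 1 else 0) + P1.1 + P2.1 + P3.1 + P4.1) := by ring
      rw [this]

-- per-cell: A's dfs call and B's flood fill produce the same count and coupled visited
theorem cell_eq (g : List (List Char)) (cells : List Char) (rowsN colsN : Nat)
    (hcells : ∀ a b : Nat, a < rowsN → b < colsN →
      cells.getD (a * colsN + b) ' ' = pvGridAt g (a : Int) (b : Int))
    (vis : List (List Bool)) (hs : pvShape rowsN colsN vis) (r c : Int) :
    floodF cells (rowsN : Int) (colsN : Int) (4 * vis.flatten.count false + 2) [(r, c)] vis.flatten 0 =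
      ((DfsC g rowsN colsN r c vis).1, (DfsC g rowsN colsN r c vis).2.flatten) := by
  have h1 : floodF cells (rowsN : Int) (colsN : Int) (4 * vis.flatten.count false + 2) [(r, c)] vis.flatten 0
      = LoopFC cells rowsN colsN [(r, c)] vis.flatten 0 := by
    unfold LoopFC
    simp only [List.length_cons, List.length_nil]
    rw [show (0:Nat) + 1 + 4 * vis.flatten.count false + 1 = 4 * vis.flatten.count false + 2 by omega]
  rw [h1, sim g cells rowsN colsN hcells (pvCF vis) vis hs (le_refl _) r c [] 0, loopFC_nil]
  simp

-- generic paired-fold relation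
theorem foldl_rel {α σA σB : Type} (R : σA → σB → Prop) (l : List α)
    (fA : σA → α → σA) (fB : σB → α → σB) :
    ∀ (a0 : σA) (b0 : σB), R a0 b0 → (∀ x ∈ l, ∀ sa sb, R sa sb → R (fA sa x) (fB sb x)) →
      R (l.foldl fA a0) (l.foldl fB b0) := by
  induction l with
  | nil => intro a0 b0 h _; simpa using h
  | cons x t ih =>
    intro a0 b0 h hstep
    simp only [List.foldl_cons]
    exact ih _ _ (hstep x (by simp) a0 b0 h) (fun y hy => hstep y (by simp [hy]))

-- a fold over range (m*n) with divmod-decoded indices is the nested fold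
theorem foldl_range_mul {σ : Type} (n : Nat) (f : σ → Nat → Nat → σ) (hn : 0 < n) :
    ∀ (m : Nat) (init : σ),
      (List.range (m * n)).foldl (fun st i => f st (i / n) (i % n)) init
        = (List.range m).foldl (fun st r => (List.range n).foldl (fun st c => f st r c) st) init := by
  intro m
  induction m with
  | zero => intro init; simp
  | succ m ih =>
    intro init
    rw [show (m + 1) * n = m * n + n from by ring, List.range_add, List.foldl_append, ih,
      List.range_succ, List.foldl_append, List.foldl_map]
    simp only [List.foldl_cons, List.foldl_nil]
    apply PySem.List.foldl_congr_mem
    intro acc x hx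
    have hxn : x < n := List.mem_range.mp hx
    have h1 : (m * n + x) / n = m := by
      rw [Nat.add_comm, Nat.mul_comm, Nat.add_mul_div_left _ _ hn, Nat.div_eq_of_lt hxn]
      omega
    have h2 : (m * n + x) % n = x := by
      rw [Nat.add_comm, Nat.mul_comm, Nat.add_mul_mod_self_left, Nat.mod_eq_of_lt hxn]
    rw [h1, h2]

-- ---- outer-loop lemmas: flat single loop with divmod versus nested loops ----

theorem flatten_replicate_rep (m n : Nat) (x : Bool) :
    (List.replicate m (List.replicate n x)).flatten = List.replicate (m * n) x := by
  induction m with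
  | zero => simp
  | succ m ih =>
    rw [List.replicate_succ, List.flatten_cons, ih,
      show (m + 1) * n = n + m * n from by ring, List.replicate_add]

theorem visAt_nat (vis : List (List Bool)) (a b : Nat) :
    pvVisAt vis (a : Int) (b : Int) = (vis.getD a []).getD b true := by
  simp [pvVisAt]

theorem getD_map_range {β : Type} (f : Nat → β) (n a : Nat) (d : β) (ha : a < n) :
    ((List.range n).map f).getD a d = f a := by
  rw [List.getD_eq_getElem _ _ (by simpa using ha), List.getElem_map, List.getElem_range]

theorem gridAt_nat (grid : List String) (a b : Nat) :
    pvGridAt (grid.map String.toList) (a : Int) (b : Int) = ((grid.getD a "").toList).getD b ' ' := by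
  unfold pvGridAt
  simp only [Int.toNat_natCast]
  suffices h : (grid.map String.toList).getD a [] = (grid.getD a "").toList by rw [h]
  by_cases ha : a < grid.length
  · rw [List.getD_eq_getElem _ _ (by simpa using ha), List.getElem_map,
      List.getD_eq_getElem _ _ ha]
  · rw [List.getD_eq_default _ _ (by simpa using Nat.le_of_not_lt ha),
      List.getD_eq_default _ _ (Nat.le_of_not_lt ha)]
    simp

theorem cellsB_spec (grid : List String) :
    ∀ a b : Nat, a < grid.length → b < (grid.headD "").length →
      (pvCellsB grid).getD (a * (grid.headD "").length + b) ' '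
        = pvGridAt (grid.map String.toList) (a : Int) (b : Int) := by
  intro a b ha hb
  unfold pvCellsB
  rw [List.flatMap_def]
  rw [flat_getD ' ' (grid.headD "").length _ a b ?_ hb]
  · rw [getD_map_range _ _ _ _ ha, getD_map_range _ _ _ _ hb, gridAt_nat grid a b]
  · intro row hrow
    obtain ⟨r, _, rfl⟩ := List.mem_map.mp hrow
    simp

theorem alt_decompose (cells : List Char) (rowsN colsN : Nat) (hn : 0 < colsN)
    (init : Int × List Bool) :
    (List.range (rowsN * colsN)).foldl (fun st i =>
      if cells.getD i ' ' = '.' ∧ st.2.getD i true = false then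
        (if st.1 < (floodF cells (rowsN : Int) (colsN : Int) (4 * List.count false st.2 + 2)
              [(((i / colsN : Nat) : Int), ((i % colsN : Nat) : Int))] st.2 0).1 then
            (floodF cells (rowsN : Int) (colsN : Int) (4 * List.count false st.2 + 2)
              [(((i / colsN : Nat) : Int), ((i % colsN : Nat) : Int))] st.2 0).1
          else st.1,
          (floodF cells (rowsN : Int) (colsN : Int) (4 * List.count false st.2 + 2)
            [(((i / colsN : Nat) : Int), ((i % colsN : Nat) : Int))] st.2 0).2)
      else st) init
    = (List.range rowsN).foldl (fun st r => (List.range colsN).foldl (fun st c =>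
        if cells.getD (r * colsN + c) ' ' = '.' ∧ st.2.getD (r * colsN + c) true = false then
          (if st.1 < (floodF cells (rowsN : Int) (colsN : Int) (4 * List.count false st.2 + 2)
                [((r : Int), (c : Int))] st.2 0).1 then
              (floodF cells (rowsN : Int) (colsN : Int) (4 * List.count false st.2 + 2)
                [((r : Int), (c : Int))] st.2 0).1
            else st.1,
            (floodF cells (rowsN : Int) (colsN : Int) (4 * List.count false st.2 + 2)
              [((r : Int), (c : Int))] st.2 0).2)
        else st) st) init := by
  rw [← foldl_range_mul colsN _ hn rowsN init]
  apply PySem.List.foldl_congr_mem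
  intro acc x _
  have hd : x / colsN * colsN + x % colsN = x := Nat.div_add_mod' x colsN
  rw [hd]

theorem foldl_flatMap_cast {σ : Type} (f : σ → Int → σ) (l : List Nat) (init : σ) :
    List.foldl f init (List.flatMap (fun a : Nat => [(a : Int)]) l) = List.foldl (fun st (a : Nat) => f st ((a : Nat) : Int)) init l := by
  induction l generalizing init with
  | nil => rfl
  | cons x t ih =>
    rw [List.flatMap_cons, List.singleton_append, List.foldl_cons, List.foldl_cons]
    exact ih _

theorem ports_eq (grid : List String) : find_max_diamonds grid = find_max_diamonds_alt grid := by
  unfold find_max_diamonds find_max_diamonds_alt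
  simp only [List.pure_def, List.bind_eq_flatMap, foldl_flatMap_cast]
  by_cases hn : (grid.headD "").length = 0
  · rw [hn]
    simp
  · have hn' : 0 < (grid.headD "").length := Nat.pos_of_ne_zero hn
    rw [alt_decompose (pvCellsB grid) grid.length (grid.headD "").length hn'
      (0, List.replicate (grid.length * (grid.headD "").length) false)]
    refine (foldl_rel
      (fun (sa : Int × List (List Bool)) (sb : Int × List Bool) =>
        sa.1 = sb.1 ∧ sb.2 = sa.2.flatten ∧ pvShape grid.length (grid.headD "").length sa.2)
      (List.range grid.length) _ _ _ _ ?h0 ?hstep).1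
    case h0 =>
      exact ⟨rfl, (flatten_replicate_rep _ _ _).symm,
        ⟨by simp, fun row h => by rw [List.eq_of_mem_replicate h]; simp⟩⟩
    case hstep =>
    intro r hr sa sb hR
    refine foldl_rel
      (fun (sa : Int × List (List Bool)) (sb : Int × List Bool) =>
        sa.1 = sb.1 ∧ sb.2 = sa.2.flatten ∧ pvShape grid.length (grid.headD "").length sa.2)
      (List.range (grid.headD "").length) _ _ _ _ hR ?_
    intro c hc ta tb htR
    obtain ⟨h1, h2, h3⟩ := htR
    have hrlt : r < grid.length := List.mem_range.mp hr
    have hclt : c < (grid.headD "").length := List.mem_range.mp hc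
    have hc1 : (pvCellsB grid).getD (r * (grid.headD "").length + c) ' '
        = pvGridAt (grid.map String.toList) (r : Int) (c : Int) := cellsB_spec grid r c hrlt hclt
    have hc2 : tb.2.getD (r * (grid.headD "").length + c) true
        = pvVisAt ta.2 (r : Int) (c : Int) := by
      rw [h2, flat_getD true (grid.headD "").length ta.2 r c h3.2 hclt, visAt_nat]
    by_cases hcond : pvGridAt (grid.map String.toList) (r : Int) (c : Int) = '.'
        ∧ pvVisAt ta.2 (r : Int) (c : Int) = false
    · rw [if_pos hcond, if_pos (show (pvCellsB grid).getD (r * (grid.headD "").length + c) ' ' = '.'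
          ∧ tb.2.getD (r * (grid.headD "").length + c) true = false from by
            rw [hc1, hc2]; exact hcond)]
      have hq : floodF (pvCellsB grid) (grid.length : Int) ((grid.headD "").length : Int)
            (4 * List.count false tb.2 + 2) [((r : Int), (c : Int))] tb.2 0
          = ((DfsC (grid.map String.toList) grid.length (grid.headD "").length (r : Int) (c : Int) ta.2).1,
             (DfsC (grid.map String.toList) grid.length (grid.headD "").length (r : Int) (c : Int) ta.2).2.flatten) := by
        rw [h2]
        exact cell_eq (grid.map String.toList) (pvCellsB grid) grid.length (grid.headD "").length
          (cellsB_spec grid) ta.2 h3 (r : Int) (c : Int)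
      unfold DfsC at hq
      rw [hq]
      refine ⟨?_, rfl, ?_⟩
      · rw [h1]
        rw [max_def]
        split_ifs <;> omega
      · exact dfs_shape _ _ _ _ _ _ _ _ _ h3
    · rw [if_neg hcond, if_neg (show ¬ ((pvCellsB grid).getD (r * (grid.headD "").length + c) ' ' = '.'
          ∧ tb.2.getD (r * (grid.headD "").length + c) true = false) from by
            rw [hc1, hc2]; exact hcond)]
      exact ⟨h1, h2, h3⟩

-- ===== VERDICT (by name: the statement is the Claim_ definition above) =====
theorem find_max_diamonds_spec : Claim_equal_find_max_diamonds := by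
  intro grid _ _
  unfold Spec_find_max_diamonds
  exact ports_eq grid
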